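-- pv_equiv track=rewrite | github.com/aymuos15/SegData | verify.py | _is_sequential_int_keys
-- ===== SOURCE A (Python) =====
-- def _is_sequential_int_keys(d):
--     """Check if dict keys are sequential string ints starting at '0'."""
--     if not d:
--         return False
--     try:
--         keys = [int(k) for k in d.keys()]
--         keys.sort()
--         return keys == list(range(len(keys))) and keys[0] == 0
--     except (ValueError, TypeError):
--         return False
-- ===== SOURCE B (Python) =====
-- def _is_sequential_int_keys(d):
--     """Check if dict keys are sequential string ints starting at '0'."""
--     n = len(d)
--     if n == 0:
--         return False
--     # One pass with a presence array: mark each int key; any failed parse,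
--     # out-of-range value or duplicate value aborts immediately.  The list is
--     # fully marked iff the keys are exactly 0..n-1.
--     seen = [False] * n
--     try:
--         for k in d:
--             v = int(k)
--             if v < 0 or v >= n or seen[v]:
--                 return False
--             seen[v] = True
--     except (ValueError, TypeError):
--         return False
--     return True
-- ===== Notes on version B (the rewrite author's own statement) =====
-- stated objective: alternative
-- what changed: Replaces A's build-all/sort/compare-to-range pipeline by a single early-exiting pass that marks each int key in a presence array of size len(d): a bad parse, out-of-range value or duplicate aborts immediately, so no key list is materialised and no sort happens.
import Mathlib
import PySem

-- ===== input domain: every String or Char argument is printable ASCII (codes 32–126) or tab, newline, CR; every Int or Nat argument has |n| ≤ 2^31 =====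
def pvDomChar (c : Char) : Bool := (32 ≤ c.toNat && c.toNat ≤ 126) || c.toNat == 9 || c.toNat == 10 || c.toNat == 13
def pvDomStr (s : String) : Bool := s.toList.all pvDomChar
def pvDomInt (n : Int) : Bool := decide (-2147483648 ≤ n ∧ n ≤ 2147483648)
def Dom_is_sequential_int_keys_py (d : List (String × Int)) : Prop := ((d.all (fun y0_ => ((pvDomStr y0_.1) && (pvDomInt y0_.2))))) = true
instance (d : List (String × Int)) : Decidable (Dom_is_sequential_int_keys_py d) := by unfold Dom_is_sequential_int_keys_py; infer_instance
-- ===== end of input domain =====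

-- B replaces A's build-all/sort/compare-to-range pipeline by a single early-exiting
-- pass marking each int key in a presence array of size len(d): an alternative
-- algorithm with no sort and no materialised key list.

-- ===== PORT A =====
-- d is the dict as an association list; its keys, in dict order, are the first
-- occurrences of the first components (PySem.Set.ofList = dict key dedup).
def is_sequential_int_keys_py (d : List (String × Int)) : Bool :=
  if d.isEmpty then false
  else
    -- keys = [int(k) for k in d.keys()]  (ValueError → except → False)
    match ((PySem.Set.ofList (d.map Prod.fst)).mapM PySem.Int.ofStr? : Option (List Int)) with
    | none => false
    | some keys0 =>
      -- keys.sort(); return keys == list(range(len(keys))) and keys[0] == 0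
      let keys := PySem.List.sorted keys0 (fun x => x) false
      decide (keys = PySem.List.pyRange 0 (keys.length : Int) 1)
        && (PySem.List.pyGet? keys 0 == some (0 : Int))

-- ===== PORT B =====
-- the 'for k in d' loop of Source B: seen is the presence array; int(k) failing to
-- parse is the caught ValueError (→ False)
def pvAltLoop (n : Nat) : List String → List Bool → Bool
  | [], _ => true
  | k :: ks, seen =>
    match PySem.Int.ofStr? k with
    | none => false
    | some v =>
      if v < 0 || (n : Int) ≤ v || seen.getD v.toNat false then false
      else pvAltLoop n ks (seen.set v.toNat true)

def is_sequential_int_keys_py_alt (d : List (String × Int)) : Bool :=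
  let kset := PySem.Set.ofList (d.map Prod.fst)   -- the dict's keys; n = len(d)
  let n := kset.length
  if n == 0 then false
  else pvAltLoop n kset (List.replicate n false)

-- ===== PRECONDITION & SPEC =====
def Spec_is_sequential_int_keys_py (d : List (String × Int)) (out : Bool) : Prop := out = is_sequential_int_keys_py_alt d
instance (d : List (String × Int)) (out : Bool) : Decidable (Spec_is_sequential_int_keys_py d out) := by unfold Spec_is_sequential_int_keys_py; infer_instance

-- ===== CLAIM (what is proved, stated in full; the proofs are below) =====
def Claim_equal_is_sequential_int_keys_py : Prop := ∀ (d : List (String × Int)), Dom_is_sequential_int_keys_py d → Spec_is_sequential_int_keys_py d (is_sequential_int_keys_py d)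

-- ===== LEMMAS AND PROOFS =====

-- mapM over Option preserves length
lemma length_of_mapM_eq_some {α β : Type} (f : α → Option β) :
    ∀ (xs : List α) (ys : List β), xs.mapM f = some ys → ys.length = xs.length := by
  intro xs
  induction xs with
  | nil => intro ys h; simp [List.mapM_nil] at h; simp [← h]
  | cons x xs ih =>
    intro ys h
    simp only [List.mapM_cons, Option.bind_eq_bind, Option.pure_def] at h
    cases hx : f x with
    | none => simp [hx] at h
    | some b =>
      simp [hx] at h
      cases hxs : xs.mapM f with
      | none => simp [hxs] at h
      | some bs =>
        simp [hxs] at h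
        subst h
        simp [ih bs hxs]

-- if some conversion fails, the one-pass loop cannot finish: it returns false
lemma pvAltLoop_none (n : Nat) :
    ∀ (ks : List String) (seen : List Bool),
      ks.mapM PySem.Int.ofStr? = none → pvAltLoop n ks seen = false := by
  intro ks
  induction ks with
  | nil => intro seen h; simp [List.mapM_nil] at h
  | cons k ks ih =>
    intro seen h
    simp only [List.mapM_cons, Option.bind_eq_bind, Option.pure_def] at h
    unfold pvAltLoop
    cases hk : PySem.Int.ofStr? k with
    | none => rfl
    | some v =>
      simp [hk] at h
      dsimp only
      cases hks : ks.mapM PySem.Int.ofStr? with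
      | none =>
        by_cases hb : (decide (v < 0) || decide ((n : Int) ≤ v) || seen.getD v.toNat false) = true
        · rw [if_pos hb]
        · rw [if_neg hb]; exact ih _ hks
      | some bs => simp [hks] at h

-- the string loop followed through a successful conversion list
def pvIntLoop (n : Nat) : List Int → List Bool → Bool
  | [], _ => true
  | v :: vs, seen =>
    if v < 0 || (n : Int) ≤ v || seen.getD v.toNat false then false
    else pvIntLoop n vs (seen.set v.toNat true)

lemma pvAltLoop_some (n : Nat) :
    ∀ (ks : List String) (vs : List Int) (seen : List Bool),
      ks.mapM PySem.Int.ofStr? = some vs → pvAltLoop n ks seen = pvIntLoop n vs seen := by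
  intro ks
  induction ks with
  | nil =>
    intro vs seen h
    simp [List.mapM_nil] at h
    subst h; rfl
  | cons k ks ih =>
    intro vs seen h
    simp only [List.mapM_cons, Option.bind_eq_bind, Option.pure_def] at h
    cases hk : PySem.Int.ofStr? k with
    | none => simp [hk] at h
    | some v =>
      simp [hk] at h
      cases hks : ks.mapM PySem.Int.ofStr? with
      | none => simp [hks] at h
      | some bs =>
        simp [hks] at h
        subst h
        unfold pvAltLoop pvIntLoop
        simp only [hk]
        by_cases hb : (decide (v < 0) || decide ((n : Int) ≤ v) || seen.getD v.toNat false) = true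
        · rw [if_pos hb, if_pos hb]
        · rw [if_neg hb, if_neg hb]; exact ih bs _ hks

-- getD after set on a Bool presence array
lemma getD_set_bool (seen : List Bool) (i j : Nat) (hi : i < seen.length) :
    (seen.set i true).getD j false = if j = i then true else seen.getD j false := by
  by_cases hji : j = i
  · subst hji
    simp [List.getD, List.getElem?_set, hi]
  · have hij : i ≠ j := fun h => hji h.symm
    simp [List.getD, List.getElem?_set_ne hij, hji]

-- characterisation of the marking loop
lemma pvIntLoop_true_iff (n : Nat) :
    ∀ (vs : List Int) (seen : List Bool), seen.length = n →
      (pvIntLoop n vs seen = true ↔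
        vs.Nodup ∧ ∀ v ∈ vs, 0 ≤ v ∧ v < (n : Int) ∧ seen.getD v.toNat false = false) := by
  intro vs
  induction vs with
  | nil => intro seen _; simp [pvIntLoop]
  | cons v vs ih =>
    intro seen hlen
    unfold pvIntLoop
    by_cases hb : (decide (v < 0) || decide ((n : Int) ≤ v) || seen.getD v.toNat false) = true
    · rw [if_pos hb]
      constructor
      · intro h; exact absurd h (by simp)
      · rintro ⟨_, hall⟩
        obtain ⟨hv0, hv1, hv2⟩ := hall v (by simp)
        have hfalse : (decide (v < 0) || decide ((n : Int) ≤ v) || seen.getD v.toNat false) = false := by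
          rw [hv2]
          simp only [Bool.or_false, Bool.or_eq_false_iff, decide_eq_false_iff_not]
          exact ⟨by omega, by omega⟩
        rw [hfalse] at hb
        exact absurd hb (by simp)
    · rw [if_neg hb]
      have hb' : (decide (v < 0) || decide ((n : Int) ≤ v) || seen.getD v.toNat false) = false :=
        Bool.eq_false_iff.mpr hb
      simp only [Bool.or_eq_false_iff, decide_eq_false_iff_not] at hb'
      obtain ⟨⟨h0, h1⟩, h2'⟩ := hb'
      have h0' : 0 ≤ v := by omega
      have h1' : v < (n : Int) := by omega
      have hvn : v.toNat < seen.length := by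
        rw [hlen]
        omega
      rw [ih (seen.set v.toNat true) (by simp [hlen])]
      constructor
      · rintro ⟨hnd, hall⟩
        refine ⟨List.nodup_cons.mpr ⟨?_, hnd⟩, ?_⟩
        · intro hmem
          have := (hall v hmem).2.2
          rw [getD_set_bool seen v.toNat v.toNat hvn] at this
          simp at this
        · intro w hw
          rcases List.mem_cons.mp hw with rfl | hw'
          · exact ⟨h0', h1', h2'⟩
          · obtain ⟨hw0, hw1, hw2⟩ := hall w hw'
            rw [getD_set_bool seen v.toNat w.toNat hvn] at hw2
            by_cases hji : w.toNat = v.toNat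
            · simp [hji] at hw2
            · simp [hji] at hw2
              exact ⟨hw0, hw1, hw2⟩
      · rintro ⟨hnd, hall⟩
        have hnotmem := (List.nodup_cons.mp hnd).1
        refine ⟨(List.nodup_cons.mp hnd).2, ?_⟩
        intro w hw
        obtain ⟨hw0, hw1, hw2⟩ := hall w (List.mem_cons_of_mem _ hw)
        refine ⟨hw0, hw1, ?_⟩
        rw [getD_set_bool seen v.toNat w.toNat hvn]
        have hwv : w ≠ v := fun h => hnotmem (h ▸ hw)
        have : w.toNat ≠ v.toNat := by omega
        simp only [this, if_false]
        simpa [List.getD] using hw2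

-- the common characterisation: the int key list is a permutation of 0..n-1
lemma perm_iff_nodup_range (vs : List Int) (n : Nat) (hlen : vs.length = n) :
    vs.Perm (PySem.List.pyRange 0 (n : Int) 1) ↔
      vs.Nodup ∧ ∀ v ∈ vs, 0 ≤ v ∧ v < (n : Int) := by
  have hrlen : (PySem.List.pyRange 0 (n : Int) 1).length = n := by
    rw [PySem.List.length_pyRange_one]; simp
  have hrnodup : (PySem.List.pyRange 0 (n : Int) 1).Nodup :=
    PySem.List.nodup_pyRange_one ..
  constructor
  · intro hp
    refine ⟨hp.nodup_iff.mpr hrnodup, ?_⟩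
    intro v hv
    have : v ∈ PySem.List.pyRange 0 (n : Int) 1 := hp.mem_iff.mp hv
    have := (PySem.List.mem_pyRange_one).mp this
    exact ⟨this.1, this.2⟩
  · rintro ⟨hnd, hall⟩
    have hsub : vs ⊆ PySem.List.pyRange 0 (n : Int) 1 := by
      intro v hv
      exact (PySem.List.mem_pyRange_one).mpr ⟨(hall v hv).1, (hall v hv).2⟩
    have hsp : vs.Subperm (PySem.List.pyRange 0 (n : Int) 1) := hnd.subperm hsub
    exact hsp.perm_of_length_le (by omega)

-- A's nonempty branch is the permutation test
lemma portA_eq_perm (ks : List Int) (hne : ks ≠ []) :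
    (decide (PySem.List.sorted ks (fun x => x) false
        = PySem.List.pyRange 0 ((PySem.List.sorted ks (fun x => x) false).length : Int) 1)
      && (PySem.List.pyGet? (PySem.List.sorted ks (fun x => x) false) 0 == some (0 : Int)))
    = decide (ks.Perm (PySem.List.pyRange 0 (ks.length : Int) 1)) := by
  have hlen : (PySem.List.sorted ks (fun x => x) false).length = ks.length :=
    PySem.List.length_sorted ..
  rw [hlen]
  apply Bool.eq_iff_iff.mpr
  simp only [Bool.and_eq_true, decide_eq_true_eq, beq_iff_eq]
  constructor
  · rintro ⟨hsort, _⟩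
    have := PySem.List.sorted_perm ks (fun x => x) false
    rw [hsort] at this
    exact this.symm
  · intro hperm
    have hsort : PySem.List.sorted ks (fun x => x) false
        = PySem.List.pyRange 0 ((ks.length : Int)) 1 :=
      PySem.List.sorted_eq_of_perm_of_pairwise_lt _ _ _ hperm.symm
        (PySem.List.pairwise_lt_pyRange_one ..)
    refine ⟨hsort, ?_⟩
    rw [hsort]
    have hpos : 0 < ks.length := List.length_pos_iff.mpr hne
    rw [PySem.List.pyRange_one_cons (a := 0) (b := (ks.length : Int)) (by exact_mod_cast hpos)]
    simp [PySem.List.pyGet?, PySem.List.pyIdx?]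

-- ===== VERDICT (by name: the statement is the Claim_ definition above) =====
theorem is_sequential_int_keys_py_spec : Claim_equal_is_sequential_int_keys_py := by
  intro d _
  unfold Spec_is_sequential_int_keys_py is_sequential_int_keys_py is_sequential_int_keys_py_alt
  by_cases hd : d.isEmpty
  · have : (PySem.Set.ofList (d.map Prod.fst)).length = 0 := by
      cases d with
      | nil => simp [PySem.Set.ofList]
      | cons p t => simp at hd
    simp [hd, this]
  · have hne : (PySem.Set.ofList (d.map Prod.fst)).length ≠ 0 := by
      cases d with
      | nil => simp at hd
      | cons p t =>
        rw [List.map_cons, PySem.Set.ofList_cons]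
        simp
    simp only [hd, Bool.false_eq_true, if_false, beq_iff_eq, hne, if_false]
    set kset := PySem.Set.ofList (d.map Prod.fst) with hkset
    set n := kset.length with hn
    cases hm : (kset.mapM PySem.Int.ofStr? : Option (List Int)) with
    | none =>
      dsimp only
      exact (pvAltLoop_none n kset _ hm).symm
    | some ks =>
      dsimp only
      have hlen : ks.length = n := length_of_mapM_eq_some _ _ _ hm
      have hksne : ks ≠ [] := by
        intro h0; subst h0; simp at hlen; omega
      rw [pvAltLoop_some n kset ks _ hm, portA_eq_perm ks hksne, hlen]
      have hchar := pvIntLoop_true_iff n ks (List.replicate n false) (by simp)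
      have hperm := perm_iff_nodup_range ks n hlen
      have hrep : ∀ v : Int, (List.replicate n false).getD v.toNat false = false := by
        intro v
        rcases Nat.lt_or_ge v.toNat n with h | h
        · simp [List.getD, List.getElem?_replicate, h]
        · simp [List.getD, List.getElem?_replicate, Nat.not_lt.mpr h]
      cases hloop : pvIntLoop n ks (List.replicate n false)
      · simp only [decide_eq_false_iff_not]
        intro hp
        have := hchar.mpr ⟨(hperm.mp hp).1, fun v hv =>
          ⟨((hperm.mp hp).2 v hv).1, ((hperm.mp hp).2 v hv).2, hrep v⟩⟩
        rw [hloop] at this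
        exact absurd this (by simp)
      · simp only [decide_eq_true_eq]
        obtain ⟨hnd, hall⟩ := hchar.mp hloop
        exact hperm.mpr ⟨hnd, fun v hv => ⟨(hall v hv).1, (hall v hv).2.1⟩⟩
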